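-- pv_equiv track=rewrite | github.com/connornebeker/budgetCally | app.py | split_by_budget
-- ===== SOURCE A (Python) =====
-- def split_by_budget(items):
--     under_budget = []
--     hit_budget = []
--     over_budget = []
--
--     for item in items:
--         if item["remaining"] < 0:
--             over_budget.append(item)
--         elif item["remaining"] == 0:
--             hit_budget.append(item)
--         else:
--             under_budget.append(item)
--
--     return under_budget, hit_budget, over_budget
-- ===== SOURCE B (Python) =====
-- def split_by_budget(items):
--     # Three independent filtering passes instead of one dispatching loop (objective: simpler).
--     over_budget = [item for item in items if item["remaining"] < 0]
--     hit_budget = [item for item in items if item["remaining"] == 0]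
--     under_budget = [item for item in items if item["remaining"] > 0]
--     return under_budget, hit_budget, over_budget
-- ===== Notes on version B (the rewrite author's own statement) =====
-- stated objective: simpler
-- what changed: Replaces the single loop that dispatches each item into one of three accumulators with three independent list-comprehension filters (one per sign of 'remaining'), returned in the original (under, hit, over) order.
import Mathlib
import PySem

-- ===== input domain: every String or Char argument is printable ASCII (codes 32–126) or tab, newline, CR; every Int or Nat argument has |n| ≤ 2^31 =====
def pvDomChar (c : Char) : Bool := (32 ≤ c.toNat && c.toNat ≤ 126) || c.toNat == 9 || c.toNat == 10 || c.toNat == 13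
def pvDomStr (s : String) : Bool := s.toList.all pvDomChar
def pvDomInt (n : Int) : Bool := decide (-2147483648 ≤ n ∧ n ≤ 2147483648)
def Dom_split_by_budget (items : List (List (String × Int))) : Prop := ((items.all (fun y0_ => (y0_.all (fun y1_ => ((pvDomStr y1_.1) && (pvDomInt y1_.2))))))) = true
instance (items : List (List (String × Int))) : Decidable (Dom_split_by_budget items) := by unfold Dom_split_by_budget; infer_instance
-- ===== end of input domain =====

-- B replaces A's single dispatching loop with three independent filtering passes (objective: simpler); equal on all inputs whose items all carry the "remaining" key (Pre_ excludes the KeyError case).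


-- shared helper: first-match lookup of "remaining" (Python dict semantics on the assoc list)
def remKey (item : List (String × Int)) : Option Int :=
  (item.find? (fun p => p.1 == "remaining")).map (·.2)

-- ===== PORT A =====
-- A: one loop, dispatching each item into one of three accumulators.
-- (the 'none' branch keeps the state; Python raises KeyError there — excluded by Pre_)
def split_by_budget (items : List (List (String × Int))) : (List (List (String × Int))) × (List (List (String × Int))) × (List (List (String × Int))) :=
  items.foldl (fun st item =>
    match remKey item with
    | none => st
    | some r =>
      if r < 0 then (st.1, st.2.1, st.2.2 ++ [item])
      else if r = 0 then (st.1, st.2.1 ++ [item], st.2.2)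
      else (st.1 ++ [item], st.2.1, st.2.2)) ([], [], [])

-- ===== PORT B =====
-- B: three independent filtering passes over items.
-- (getD 0 is a totality guard for the missing key, which Python B raises on — excluded by Pre_)
def split_by_budget_alt (items : List (List (String × Int))) : (List (List (String × Int))) × (List (List (String × Int))) × (List (List (String × Int))) :=
  let over_budget := items.filter (fun i => decide ((remKey i).getD 0 < 0))
  let hit_budget := items.filter (fun i => decide ((remKey i).getD 0 = 0))
  let under_budget := items.filter (fun i => decide (0 < (remKey i).getD 0))
  (under_budget, hit_budget, over_budget)

-- ===== PRECONDITION & SPEC =====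
-- Pre_ excludes items missing the "remaining" key, on which Python A (and B) raise KeyError.
def Pre_split_by_budget (items : List (List (String × Int))) : Prop :=
  (items.all (fun item => (remKey item).isSome)) = true
instance (items : List (List (String × Int))) : Decidable (Pre_split_by_budget items) := by unfold Pre_split_by_budget; infer_instance
def pvWitness_split_by_budget : (List (List (String × Int))) := [[("remaining", 1)], [("remaining", 0), ("spent", 5)], [("remaining", -2)]]
def Spec_split_by_budget (items : List (List (String × Int))) (out : (List (List (String × Int))) × (List (List (String × Int))) × (List (List (String × Int)))) : Prop := out = split_by_budget_alt items
instance (items : List (List (String × Int))) (out : (List (List (String × Int))) × (List (List (String × Int))) × (List (List (String × Int)))) : Decidable (Spec_split_by_budget items out) := by unfold Spec_split_by_budget; infer_instance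

-- ===== CLAIM (what is proved, stated in full; the proofs are below) =====
def Claim_equal_split_by_budget : Prop := ∀ (items : List (List (String × Int))), Dom_split_by_budget items → Pre_split_by_budget items → Spec_split_by_budget items (split_by_budget items)

-- ===== LEMMAS AND PROOFS =====

lemma split_foldl_inv (items : List (List (String × Int)))
    (h : ∀ i ∈ items, (remKey i).isSome) :
    ∀ (u hb o : List (List (String × Int))),
      items.foldl (fun st item =>
        match remKey item with
        | none => st
        | some r =>
          if r < 0 then (st.1, st.2.1, st.2.2 ++ [item])
          else if r = 0 then (st.1, st.2.1 ++ [item], st.2.2)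
          else (st.1 ++ [item], st.2.1, st.2.2)) (u, hb, o)
      = (u ++ items.filter (fun i => decide (0 < (remKey i).getD 0)),
         hb ++ items.filter (fun i => decide ((remKey i).getD 0 = 0)),
         o ++ items.filter (fun i => decide ((remKey i).getD 0 < 0))) := by
  induction items with
  | nil => intro u hb o; simp
  | cons a t ih =>
    intro u hb o
    obtain ⟨r, hr⟩ := Option.isSome_iff_exists.mp (h a (List.mem_cons_self ..))
    have ht : ∀ i ∈ t, (remKey i).isSome := fun i hi => h i (List.mem_cons_of_mem _ hi)
    simp only [List.foldl_cons, List.filter_cons, hr]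
    rcases lt_trichotomy r 0 with hlt | heq | hgt
    · rw [if_pos hlt, ih ht]
      simp [hlt, not_lt.mpr hlt.le, hlt.ne, List.append_assoc]
    · subst heq
      rw [if_neg (lt_irrefl 0), if_pos rfl, ih ht]
      simp [List.append_assoc]
    · rw [if_neg (not_lt.mpr hgt.le), if_neg hgt.ne', ih ht]
      simp [hgt, not_lt.mpr hgt.le, hgt.ne', List.append_assoc]

-- ===== VERDICT (by name: the statement is the Claim_ definition above) =====
theorem split_by_budget_spec : Claim_equal_split_by_budget := by
  intro items _ hpre
  have h : ∀ i ∈ items, (remKey i).isSome := by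
    intro i hi
    exact List.all_eq_true.mp hpre i hi
  show split_by_budget items = split_by_budget_alt items
  unfold split_by_budget split_by_budget_alt
  rw [split_foldl_inv items h]
  simp
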